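-- pv_equiv track=rewrite | github.com/AliceJump/ClipboardGo-python | clipboardReader.py | choose_clipboard_item
-- ===== SOURCE A (Python) =====
-- def choose_clipboard_item(items):
--     # files 优先
--     for item in items:
--         if item["type"] == "files":
--             return item
--
--     # image 次之
--     for item in items:
--         if item["type"] == "image":
--             return item
--
--     # 最后 text
--     for item in items:
--         if item["type"] == "text":
--             return item
--
--     return None
-- ===== SOURCE B (Python) =====
-- def choose_clipboard_item(items):
--     first_image = None
--     first_text = None
--     for item in items:
--         t = item["type"]
--         if t == "files":
--             return item
--         if t == "image" and first_image is None:
--             first_image = item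
--         elif t == "text" and first_text is None:
--             first_text = item
--     return first_image if first_image is not None else first_text
-- ===== Notes on version B (the rewrite author's own statement) =====
-- stated objective: alternative
-- what changed: Replaces A's three sequential scans (files, then image, then text) by one single pass that returns immediately on 'files' and remembers the first image and first text, choosing between them after the loop.
import Mathlib
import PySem

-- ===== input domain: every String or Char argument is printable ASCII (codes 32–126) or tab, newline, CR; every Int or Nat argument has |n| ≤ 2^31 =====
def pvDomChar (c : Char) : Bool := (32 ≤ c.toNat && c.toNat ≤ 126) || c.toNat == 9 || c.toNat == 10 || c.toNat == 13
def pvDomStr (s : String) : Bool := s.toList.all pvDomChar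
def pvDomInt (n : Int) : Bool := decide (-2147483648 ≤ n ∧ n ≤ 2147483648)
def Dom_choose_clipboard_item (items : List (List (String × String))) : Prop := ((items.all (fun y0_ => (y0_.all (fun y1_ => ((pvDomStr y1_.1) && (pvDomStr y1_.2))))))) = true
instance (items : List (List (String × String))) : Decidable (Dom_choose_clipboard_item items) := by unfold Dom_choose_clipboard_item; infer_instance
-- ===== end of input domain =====

-- B does one pass instead of A's three scans (returning at once on 'files', remembering the
-- first image and first text); equivalence of return values is proved on inputs whose items
-- all carry a "type" key.

-- ===== PORT A =====
-- item["type"]: dict lookup, first match; none models the KeyError (excluded by Pre_)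
def pvGetType (item : List (String × String)) : Option String :=
  (PySem.Dict.mk item).get? "type"

-- first loop of A: scan for "files"
def pvScanA (want : String) : List (List (String × String)) → Option (List (String × String))
  | [] => none
  | item :: rest =>
    match pvGetType item with
    | none => none                       -- KeyError (outside Pre_)
    | some t => if t = want then some item else pvScanA want rest

def choose_clipboard_item (items : List (List (String × String))) : Option (List (String × String)) :=
  match pvScanA "files" items with
  | some r => some r
  | none =>
    match pvScanA "image" items with
    | some r => some r
    | none => pvScanA "text" items

-- ===== PORT B =====
-- single pass with the two accumulators first_image / first_text
def pvLoopB : List (List (String × String)) → Option (List (String × String)) →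
    Option (List (String × String)) → Option (List (String × String))
  | [], fi, ft => match fi with | some r => some r | none => ft
  | item :: rest, fi, ft =>
    match pvGetType item with
    | none => none                       -- KeyError (outside Pre_)
    | some t =>
      if t = "files" then some item
      else if t = "image" ∧ fi = none then pvLoopB rest (some item) ft
      else if t = "text" ∧ ft = none then pvLoopB rest fi (some item)
      else pvLoopB rest fi ft

def choose_clipboard_item_alt (items : List (List (String × String))) : Option (List (String × String)) :=
  pvLoopB items none none

-- ===== PRECONDITION & SPEC =====
-- Pre_ excludes exactly the inputs on which A raises KeyError: those where an item without a
-- "type" key is reached before the first 'files' item lets A return (B raises there too).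
def Pre_choose_clipboard_item (items : List (List (String × String))) : Prop :=
  (∀ item ∈ items.takeWhile (fun it => pvGetType it ≠ some "files"), (pvGetType item).isSome) ∧
  ((items.takeWhile (fun it => pvGetType it ≠ some "files")).length < items.length ∨
    ∀ item ∈ items, (pvGetType item).isSome)
instance (items : List (List (String × String))) : Decidable (Pre_choose_clipboard_item items) := by unfold Pre_choose_clipboard_item; infer_instance

def pvWitness_choose_clipboard_item : (List (List (String × String))) :=
  [[("type", "text"), ("data", "a")], [("type", "image")]]

def Spec_choose_clipboard_item (items : List (List (String × String))) (out : Option (List (String × String))) : Prop := out = choose_clipboard_item_alt items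
instance (items : List (List (String × String))) (out : Option (List (String × String))) : Decidable (Spec_choose_clipboard_item items out) := by unfold Spec_choose_clipboard_item; infer_instance

-- ===== CLAIM (what is proved, stated in full; the proofs are below) =====
def Claim_equal_choose_clipboard_item : Prop := ∀ (items : List (List (String × String))), Dom_choose_clipboard_item items → Pre_choose_clipboard_item items → Spec_choose_clipboard_item items (choose_clipboard_item items)

-- ===== LEMMAS AND PROOFS =====

-- loop invariant: under Pre_, B's single pass equals the layered choice
-- files-in-rest, then the remembered image, then image-in-rest, then the remembered text,
-- then text-in-rest.
theorem pvLoopB_inv (l : List (List (String × String)))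
    (fi ft : Option (List (String × String)))
    (h : ∀ item ∈ l, (pvGetType item).isSome) :
    pvLoopB l fi ft =
      ((pvScanA "files" l).or (fi.or ((pvScanA "image" l).or (ft.or (pvScanA "text" l))))) := by
  induction l generalizing fi ft with
  | nil => cases fi <;> cases ft <;> simp [pvLoopB, pvScanA, Option.or]
  | cons item rest ih =>
    have hhead : (pvGetType item).isSome := h item (by simp)
    have hrest : ∀ x ∈ rest, (pvGetType x).isSome := fun x hx => h x (by simp [hx])
    obtain ⟨t, ht⟩ := Option.isSome_iff_exists.mp hhead
    simp only [pvLoopB, pvScanA, ht]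
    by_cases hf : t = "files"
    · simp [hf, Option.or]
    · by_cases hi : t = "image"
      · subst hi
        cases fi <;> simp [hf, ih _ _ hrest, Option.or]
      · by_cases htx : t = "text"
        · subst htx
          cases ft <;> cases fi <;> simp [hf, hi, ih _ _ hrest, Option.or]
        · simp [hf, hi, htx, ih _ _ hrest]

-- when a 'files' item exists past a clean prefix, B's pass returns exactly what A's first scan does
theorem pvLoopB_files (l : List (List (String × String)))
    (fi ft : Option (List (String × String)))
    (h : ∀ item ∈ l.takeWhile (fun it => pvGetType it ≠ some "files"), (pvGetType item).isSome)
    (hlen : (l.takeWhile (fun it => pvGetType it ≠ some "files")).length < l.length) :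
    pvLoopB l fi ft = pvScanA "files" l := by
  induction l generalizing fi ft with
  | nil => simp at hlen
  | cons item rest ih =>
    by_cases hfile : pvGetType item = some "files"
    · simp [pvLoopB, pvScanA, hfile]
    · have hmem : item ∈ (item :: rest).takeWhile (fun it => pvGetType it ≠ some "files") := by
        simp [hfile]
      have hhead := h item hmem
      obtain ⟨t, ht⟩ := Option.isSome_iff_exists.mp hhead
      have htne : t ≠ "files" := by rintro rfl; exact hfile ht
      have htw : (item :: rest).takeWhile (fun it => pvGetType it ≠ some "files") =
          item :: rest.takeWhile (fun it => pvGetType it ≠ some "files") := by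
        simp [hfile]
      have hrest : ∀ x ∈ rest.takeWhile (fun it => pvGetType it ≠ some "files"),
          (pvGetType x).isSome := by
        intro x hx; exact h x (by rw [htw]; exact List.mem_cons_of_mem _ (by simpa using hx))
      have hlen' : (rest.takeWhile (fun it => pvGetType it ≠ some "files")).length <
          rest.length := by rw [htw] at hlen; simpa using hlen
      simp only [pvLoopB, pvScanA, ht, if_neg htne]
      split_ifs <;> exact ih _ _ hrest hlen'

-- under the same hypotheses A's first scan actually finds the files item
theorem pvScanA_files_isSome (l : List (List (String × String)))
    (h : ∀ item ∈ l.takeWhile (fun it => pvGetType it ≠ some "files"), (pvGetType item).isSome)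
    (hlen : (l.takeWhile (fun it => pvGetType it ≠ some "files")).length < l.length) :
    (pvScanA "files" l).isSome := by
  induction l with
  | nil => simp at hlen
  | cons item rest ih =>
    by_cases hfile : pvGetType item = some "files"
    · simp [pvScanA, hfile]
    · have hmem : item ∈ (item :: rest).takeWhile (fun it => pvGetType it ≠ some "files") := by
        simp [hfile]
      obtain ⟨t, ht⟩ := Option.isSome_iff_exists.mp (h item hmem)
      have htne : t ≠ "files" := by rintro rfl; exact hfile ht
      have htw : (item :: rest).takeWhile (fun it => pvGetType it ≠ some "files") =
          item :: rest.takeWhile (fun it => pvGetType it ≠ some "files") := by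
        simp [hfile]
      simp only [pvScanA, ht, if_neg htne]
      refine ih (fun x hx => h x (by rw [htw]; exact List.mem_cons_of_mem _ (by simpa using hx))) ?_
      rw [htw] at hlen; simpa using hlen

-- ===== VERDICT (by name: the statement is the Claim_ definition above) =====
theorem choose_clipboard_item_spec : Claim_equal_choose_clipboard_item := by
  intro items _ hpre
  obtain ⟨hpfx, hrest⟩ := hpre
  unfold Spec_choose_clipboard_item choose_clipboard_item choose_clipboard_item_alt
  rcases hrest with hlen | hall
  · rw [pvLoopB_files items none none hpfx hlen]
    obtain ⟨r, hr⟩ := Option.isSome_iff_exists.mp (pvScanA_files_isSome items hpfx hlen)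
    simp [hr]
  · rw [pvLoopB_inv items none none hall]
    cases pvScanA "files" items <;> cases pvScanA "image" items <;>
      simp [Option.or]
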